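-- pv_equiv track=rewrite | github.com/verba-neo/sw-camp-2nd-algo | prgmrs/121683-외톨이알파벳/안지혜.py | solution
-- ===== SOURCE A (Python) =====
-- def solution(input_string):
--     char_dict = {}
--
--     # 딕셔너리 생성. key = 알파벳, value = [인덱스]
--     for idx, char in enumerate(input_string):
--         if char_dict.get(char):
--             char_dict[char] = char_dict[char] + [idx]
--         else:
--             char_dict.setdefault(char, [idx])
--
--     alphas = []
--     for alpha, indexes in char_dict.items():
--         index_count = len(indexes)
--
--         if index_count >= 2:
--             first_index = indexes[0]
--             for i, index in enumerate(indexes):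
--                 # 연속되지 않은 알파벳은 alphas에 넣을 것임. 첫번째 인덱스는 넘기고, 두번째 인덱스부터 연속된 숫자인지 체크
--                 if index != first_index and index != first_index+i:
--                     alphas.append(alpha)
--                     break
--     alphas.sort()
--
--     answer = ''.join(alphas) if alphas else 'N'
--     return answer
-- ===== SOURCE B (Python) =====
-- def solution(input_string):
--     # Run-length view: keep only the first character of each maximal run;
--     # a character is "lonely" iff it starts at least two runs.
--     collapsed = [ch for i, ch in enumerate(input_string) if i == 0 or input_string[i - 1] != ch]
--     lonely = sorted({ch for ch in collapsed if collapsed.count(ch) >= 2})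
--     return ''.join(lonely) if lonely else 'N'
-- ===== Notes on version B (the rewrite author's own statement) =====
-- stated objective: simpler
-- what changed: Replaces the per-character index-list dictionary plus the nested first_index+i consecutiveness scan with run-length collapsing (keep the first char of each maximal run) and a plain count>=2 test on the collapsed list.
import Mathlib
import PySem

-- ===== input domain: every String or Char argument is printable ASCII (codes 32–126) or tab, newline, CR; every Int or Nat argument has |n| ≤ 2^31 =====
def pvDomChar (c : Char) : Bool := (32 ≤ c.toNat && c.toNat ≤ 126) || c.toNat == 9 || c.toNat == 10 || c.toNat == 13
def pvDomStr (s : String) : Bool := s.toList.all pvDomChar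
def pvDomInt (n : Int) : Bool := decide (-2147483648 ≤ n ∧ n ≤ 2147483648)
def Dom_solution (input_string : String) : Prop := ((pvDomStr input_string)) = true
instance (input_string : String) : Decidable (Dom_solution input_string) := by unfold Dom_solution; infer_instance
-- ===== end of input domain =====

-- B replaces A's per-character index-list dictionary and its nested first_index+i
-- consecutiveness scan with run-length collapsing plus a count >= 2 test; objective: simpler.

-- ===== PORT A =====
-- inner loop: 'for i, index in enumerate(indexes): if index != first_index and index != first_index+i: …; break'
def pvChk (first : Int) (i : Int) : List Int → Bool
  | [] => false
  | x :: t => if x ≠ first ∧ x ≠ first + i then true else pvChk first (i + 1) t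

def solution (input_string : String) : String :=
  let d := (PySem.List.enumerate input_string.toList 0).foldl
    (fun d p =>
      if ((d.get? p.2).getD []) ≠ ([] : List Int) then
        d.insert p.2 ((d.get? p.2).getD [] ++ [p.1])
      else
        d.setdefault p.2 [p.1])
    PySem.Dict.empty
  let alphas := d.items.foldl
    (fun acc p =>
      if 2 ≤ p.2.length then
        if pvChk (p.2.headD 0) 0 p.2 then acc ++ [p.1] else acc
      else acc) ([] : List Char)
  let sortedAlphas := PySem.List.sorted alphas (fun x => x) false
  if sortedAlphas ≠ [] then String.mk sortedAlphas else "N"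

-- ===== PORT B =====
def solution_alt (input_string : String) : String :=
  let cs := input_string.toList
  let collapsed := ((PySem.List.enumerate cs 0).filter
      (fun p => decide (p.1 = 0) || !(PySem.List.pyGet? cs (p.1 - 1) == some p.2))).map (fun p => p.2)
  let lonely := PySem.List.sorted
      (PySem.Set.ofList (collapsed.filter (fun ch => 2 ≤ PySem.List.count collapsed ch)))
      (fun x => x) false
  if lonely ≠ [] then String.mk lonely else "N"

-- ===== PRECONDITION & SPEC =====
def Spec_solution (input_string : String) (out : String) : Prop := out = solution_alt input_string
instance (input_string : String) (out : String) : Decidable (Spec_solution input_string out) := by unfold Spec_solution; infer_instance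

-- ===== CLAIM (what is proved, stated in full; the proofs are below) =====
def Claim_equal_solution : Prop := ∀ (input_string : String), Dom_solution input_string → Spec_solution input_string (solution input_string)

-- ===== LEMMAS AND PROOFS =====

-- spec-level views of the two pipelines (over List Char)
def pvIdxs (c : Char) (cs : List Char) : List Int :=
  ((PySem.List.enumerate cs 0).filter (fun p => p.2 == c)).map (fun p => p.1)

def pvColl (cs : List Char) : List Char :=
  ((PySem.List.enumerate cs 0).filter
      (fun p => decide (p.1 = 0) || !(PySem.List.pyGet? cs (p.1 - 1) == some p.2))).map (fun p => p.2)

def pvPA (l : List Int) : Bool := decide (2 ≤ l.length) && pvChk (l.headD 0) 0 l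

def pvConsec (f : Int) (m : Nat) : List Int := (List.range m).map (fun (j : Nat) => f + (j : Int))

theorem pvCount_eq (l : List Char) (x : Char) : PySem.List.count l x = l.count x := by
  simp [PySem.List.count]

-- snoc lemmas
theorem pvIdxs_snoc (c a : Char) (cs : List Char) :
    pvIdxs c (cs ++ [a]) = pvIdxs c cs ++ (if a = c then [(cs.length : Int)] else []) := by
  unfold pvIdxs
  rw [PySem.List.enumerate_append, List.filter_append, List.map_append]
  congr 1
  rcases eq_or_ne a c with rfl | hac
  · simp [PySem.List.enumerate_cons, PySem.List.enumerate_nil]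
  · simp [PySem.List.enumerate_cons, PySem.List.enumerate_nil, hac]

theorem pvColl_snoc (a : Char) (cs : List Char) :
    pvColl (cs ++ [a]) = pvColl cs ++ (if cs.getLast? = some a then [] else [a]) := by
  unfold pvColl
  rw [PySem.List.enumerate_append, List.filter_append, List.map_append]
  congr 1
  · congr 1
    apply List.filter_congr
    intro p hp
    rcases (PySem.List.mem_enumerate_iff cs 0 p).1 hp with ⟨k, hk, rfl⟩
    by_cases hk0 : k = 0
    · subst hk0; simp
    · have h1 : ((0 : Int) + (k : Int)) - 1 = ((k - 1 : Nat) : Int) := by push_cast; omega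
      simp only [h1, PySem.List.pyGet?_natCast]
      rw [List.getElem?_append_left (by omega)]
  · rw [PySem.List.enumerate_cons, PySem.List.enumerate_nil]
    by_cases hn : cs = []
    · subst hn; simp
    · have hlen : 1 ≤ cs.length := List.length_pos_iff.mpr hn
      have h1 : ((0 : Int) + (cs.length : Int)) - 1 = ((cs.length - 1 : Nat) : Int) := by
        push_cast; omega
      have hne : ¬ ((0 : Int) + (cs.length : Int) = 0) := by
        have : (1 : Int) ≤ (cs.length : Int) := by exact_mod_cast hlen
        omega
      simp only [List.filter_cons, List.filter_nil, h1, PySem.List.pyGet?_natCast]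
      rw [List.getElem?_append_left (by omega)]
      have hlast : cs[cs.length - 1]? = cs.getLast? := (List.getLast?_eq_getElem?).symm
      rw [hlast]
      by_cases hg : cs.getLast? = some a
      · simp [hg, hn]
      · simp [hg]

theorem pvColl_sub {x : Char} {cs : List Char} (h : x ∈ pvColl cs) : x ∈ cs := by
  unfold pvColl at h
  rcases List.mem_map.1 h with ⟨p, hp, rfl⟩
  rcases (PySem.List.mem_enumerate_iff cs 0 p).1 (List.mem_filter.1 hp).1 with ⟨k, hk, rfl⟩
  simpa using List.getElem_mem hk

-- chk lemmas
theorem pvChk_append_true (f : Int) (t : List Int) :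
    ∀ (l : List Int) (i : Int), pvChk f i l = true → pvChk f i (l ++ t) = true := by
  intro l
  induction l with
  | nil => intro i h; simp [pvChk] at h
  | cons x xs ih =>
    intro i h
    rw [List.cons_append]
    simp only [pvChk] at h ⊢
    by_cases hc : x ≠ f ∧ x ≠ f + i
    · rw [if_pos hc]
    · rw [if_neg hc] at h ⊢; exact ih _ h

theorem pvChk_consec (f : Int) :
    ∀ (k : Nat) (i : Int), pvChk f i ((List.range k).map (fun (j : Nat) => f + i + (j : Int))) = false := by
  intro k
  induction k with
  | zero => intro i; simp [pvChk]
  | succ n ih =>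
    intro i
    rw [List.range_succ_eq_map, List.map_cons, List.map_map]
    have h2 : ((fun (j : Nat) => f + i + (j : Int)) ∘ Nat.succ) = (fun (j : Nat) => f + (i + 1) + (j : Int)) := by
      funext j; simp [Function.comp, Nat.succ_eq_add_one]; push_cast; ring
    rw [h2]
    simp only [pvChk, Nat.cast_zero, add_zero]
    rw [if_neg (by simp)]
    exact ih (i + 1)

theorem pvChk_consec_snoc (f : Int) :
    ∀ (k : Nat) (i x : Int), x ≠ f → x ≠ f + i + (k : Int) →
      pvChk f i ((List.range k).map (fun (j : Nat) => f + i + (j : Int)) ++ [x]) = true := by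
  intro k
  induction k with
  | zero =>
    intro i x h1 h2
    have h2' : x ≠ f + i := by simpa using h2
    simp [pvChk, h1, h2']
  | succ n ih =>
    intro i x h1 h2
    rw [List.range_succ_eq_map, List.map_cons, List.map_map]
    have hcomp : ((fun (j : Nat) => f + i + (j : Int)) ∘ Nat.succ) = (fun (j : Nat) => f + (i + 1) + (j : Int)) := by
      funext j; simp [Function.comp, Nat.succ_eq_add_one]; push_cast; ring
    rw [hcomp, List.cons_append]
    simp only [pvChk, Nat.cast_zero, add_zero]
    rw [if_neg (by simp)]
    exact ih (i + 1) x h1 (by push_cast at h2 ⊢; omega)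

-- consecutive-block facts
theorem pvConsec_length (f : Int) (m : Nat) : (pvConsec f m).length = m := by simp [pvConsec]

theorem pvConsec_snoc (f : Int) (m : Nat) : pvConsec f (m + 1) = pvConsec f m ++ [f + (m : Int)] := by
  simp [pvConsec, List.range_succ]

theorem pvConsec_shift (f : Int) (m : Nat) :
    pvConsec f m = (List.range m).map (fun (j : Nat) => f + 0 + (j : Int)) := by
  simp [pvConsec]

theorem pvConsec_headD (f : Int) (m : Nat) (hm : 1 ≤ m) : (pvConsec f m).headD 0 = f := by
  cases m with
  | zero => omega
  | succ n => simp [pvConsec, List.range_succ_eq_map]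

theorem pvConsec_ne_nil (f : Int) (m : Nat) (hm : 1 ≤ m) : pvConsec f m ≠ [] := by
  intro h
  have := congrArg List.length h
  rw [pvConsec_length] at this
  simp at this
  omega

theorem pvHeadD_append (l : List Int) (t : List Int) (h : l ≠ []) :
    (l ++ t).headD 0 = l.headD 0 := by
  cases l with
  | nil => simp at h
  | cons y ys => simp

theorem pvPA_single (x : Int) : pvPA [x] = false := by simp [pvPA]

theorem pvPA_consec (f : Int) (m : Nat) : pvPA (pvConsec f m) = false := by
  unfold pvPA
  by_cases hm : 2 ≤ (pvConsec f m).length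
  · have hm1 : 1 ≤ m := by rw [pvConsec_length] at hm; omega
    rw [pvConsec_headD f m hm1]
    have hc := pvChk_consec f m 0
    rw [← pvConsec_shift] at hc
    simp [hc]
  · simp [hm]

theorem pvPA_append (l : List Int) (x : Int) (h : pvPA l = true) : pvPA (l ++ [x]) = true := by
  unfold pvPA at h ⊢
  rw [Bool.and_eq_true] at h
  obtain ⟨h1, h2⟩ := h
  have hlen : 2 ≤ l.length := of_decide_eq_true h1
  have hne : l ≠ [] := by intro he; subst he; simp at hlen
  rw [Bool.and_eq_true]
  refine ⟨decide_eq_true (by simp; omega), ?_⟩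
  rw [pvHeadD_append l [x] hne]
  exact pvChk_append_true _ [x] l 0 h2

theorem pvPA_consec_snoc (f : Int) (m : Nat) (x : Int) (hm : 1 ≤ m) (h1 : x ≠ f)
    (h2 : x ≠ f + (m : Int)) : pvPA (pvConsec f m ++ [x]) = true := by
  unfold pvPA
  rw [Bool.and_eq_true]
  constructor
  · exact decide_eq_true (by simp [pvConsec]; omega)
  · rw [pvHeadD_append _ _ (pvConsec_ne_nil f m hm), pvConsec_headD f m hm, pvConsec_shift]
    exact pvChk_consec_snoc f m 0 x h1 (by simpa using h2)

-- the run-counting invariant: for each character, the number of runs it starts in cs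
-- (= its count in the collapsed list) determines A's non-consecutiveness verdict on its index list
def pvInv (cs : List Char) (c : Char) : Prop :=
  ((pvColl cs).count c = 0 ↔ pvIdxs c cs = []) ∧
  ((pvColl cs).count c = 1 →
    ∃ (f : Int) (m : Nat), 1 ≤ m ∧ 0 ≤ f ∧ f + (m : Int) ≤ (cs.length : Int) ∧
      pvIdxs c cs = pvConsec f m ∧ (cs.getLast? = some c ↔ f + (m : Int) = (cs.length : Int))) ∧
  (2 ≤ (pvColl cs).count c ↔ pvPA (pvIdxs c cs) = true) ∧
  (cs.getLast? = some c → 1 ≤ (pvColl cs).count c)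

theorem pvMain (cs : List Char) : ∀ c, pvInv cs c := by
  induction cs using List.reverseRecOn with
  | nil =>
    intro c
    unfold pvInv
    simp [pvColl, pvIdxs, pvPA, pvChk, PySem.List.enumerate_nil]
  | append_singleton cs a ih =>
    intro c
    have ihc := ih c
    unfold pvInv at ihc
    obtain ⟨h0, h1, h2, h3⟩ := ihc
    unfold pvInv
    rw [pvIdxs_snoc, pvColl_snoc, List.getLast?_concat]
    simp only [List.length_append, List.length_cons, List.length_nil]
    rcases eq_or_ne a c with rfl | hac
    · rw [if_pos rfl]
      by_cases hl : cs.getLast? = some a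
      · rw [if_pos hl, List.append_nil]
        have hge1 := h3 hl
        refine ⟨?_, ?_, ?_, ?_⟩
        · constructor
          · intro h; exact absurd h (by omega)
          · intro h; simp at h
        · intro hc1
          obtain ⟨f, m, hm1, hf0, hfm, hI, hiff⟩ := h1 hc1
          have hfmn : f + (m : Int) = (cs.length : Int) := hiff.1 hl
          refine ⟨f, m + 1, by omega, hf0, by push_cast; omega, ?_, ?_⟩
          · rw [hI, pvConsec_snoc, hfmn]
          · constructor
            · intro _; push_cast; omega
            · intro _; rfl
        · constructor
          · intro hge2
            exact pvPA_append _ _ (h2.1 hge2)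
          · intro hPA'
            by_contra hlt
            have hc1 : (pvColl cs).count a = 1 := by omega
            obtain ⟨f, m, hm1, hf0, hfm, hI, hiff⟩ := h1 hc1
            have hfmn : f + (m : Int) = (cs.length : Int) := hiff.1 hl
            rw [hI, ← hfmn, ← pvConsec_snoc, pvPA_consec] at hPA'
            cases hPA'
        · intro _; omega
      · rw [if_neg hl]
        rw [List.count_append]
        have hone : ([a].count a) = 1 := by simp
        rw [hone]
        by_cases hc0 : (pvColl cs).count a = 0
        · have hI : pvIdxs a cs = [] := h0.1 hc0
          rw [hI, List.nil_append, hc0]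
          refine ⟨?_, ?_, ?_, ?_⟩
          · constructor
            · intro h; exact absurd h (by omega)
            · intro h; simp at h
          · intro _
            refine ⟨(cs.length : Int), 1, le_refl 1, by positivity, by push_cast; omega, ?_, ?_⟩
            · have hcons : pvConsec ((cs.length : Nat) : Int) 1 = [((cs.length : Nat) : Int)] := by
                rw [pvConsec_snoc]
                simp [pvConsec]
              rw [hcons]
            · constructor
              · intro _; push_cast; omega
              · intro _; rfl
          · constructor
            · intro h; exact absurd h (by omega)
            · intro h; rw [pvPA_single] at h; cases h
          · intro _; omega
        · by_cases hc1 : (pvColl cs).count a = 1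
          · obtain ⟨f, m, hm1, hf0, hfm, hI, hiff⟩ := h1 hc1
            have hlt : f + (m : Int) < (cs.length : Int) :=
              lt_of_le_of_ne hfm (fun h => hl (hiff.2 h))
            rw [hI, hc1]
            have hPA : pvPA (pvConsec f m ++ [(cs.length : Int)]) = true :=
              pvPA_consec_snoc f m _ hm1 (by omega) (by omega)
            refine ⟨?_, ?_, ?_, ?_⟩
            · constructor
              · intro h; exact absurd h (by omega)
              · intro h; simp at h
            · intro h; exact absurd h (by omega)
            · constructor
              · intro _; exact hPA
              · intro _; omega
            · intro _; omega
          · have hge : 2 ≤ (pvColl cs).count a := by omega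
            have hPA := h2.1 hge
            refine ⟨?_, ?_, ?_, ?_⟩
            · constructor
              · intro h; exact absurd h (by omega)
              · intro h; simp at h
            · intro h; exact absurd h (by omega)
            · constructor
              · intro _; exact pvPA_append _ _ hPA
              · intro _; omega
            · intro _; omega
    · rw [if_neg hac, List.append_nil, List.count_append]
      have hzero : ((if cs.getLast? = some a then ([] : List Char) else [a]).count c) = 0 := by
        split_ifs
        · simp
        · rw [List.count_eq_zero]
          simpa using Ne.symm hac
      rw [hzero, Nat.add_zero]
      refine ⟨h0, ?_, h2, ?_⟩
      · intro hc1
        obtain ⟨f, m, hm1, hf0, hfm, hI, hiff⟩ := h1 hc1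
        refine ⟨f, m, hm1, hf0, by push_cast at hfm ⊢; omega, hI, ?_⟩
        constructor
        · intro h; exact absurd h (by simp [hac])
        · intro h
          exfalso
          have : f + (m : Int) ≤ (cs.length : Int) := hfm
          push_cast at h
          omega
      · intro h; exact absurd h (by simp [hac])

-- A's dictionary-building loop, rewritten as a modify-loop (all stored values are nonempty)
theorem pvFold_eq (l : List (Int × Char)) :
    ∀ (d : PySem.Dict Char (List Int)), (∀ k v, d.get? k = some v → v ≠ []) →
    l.foldl (fun d p =>
      if ((d.get? p.2).getD []) ≠ ([] : List Int) then
        d.insert p.2 ((d.get? p.2).getD [] ++ [p.1])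
      else
        d.setdefault p.2 [p.1]) d
    = l.foldl (fun d p => d.modify p.2 [] (fun v => v ++ [p.1])) d := by
  induction l with
  | nil => intro d _; rfl
  | cons p t ih =>
    intro d hinv
    simp only [List.foldl_cons]
    have hmod : d.modify p.2 [] (fun v => v ++ [p.1]) = d.insert p.2 (d.getD p.2 [] ++ [p.1]) := rfl
    have hstep : (if ((d.get? p.2).getD []) ≠ ([] : List Int) then
        d.insert p.2 ((d.get? p.2).getD [] ++ [p.1])
      else d.setdefault p.2 [p.1]) = d.insert p.2 (d.getD p.2 [] ++ [p.1]) := by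
      rw [PySem.Dict.getD_eq_get?_getD]
      cases hg : d.get? p.2 with
      | none =>
        have hc : d.contains p.2 = false := by
          rw [PySem.Dict.contains_eq_isSome_get?, hg]; rfl
        simp [hg, PySem.Dict.setdefault_of_not_contains, hc]
      | some v =>
        have hv : v ≠ [] := hinv _ _ hg
        simp [hg, hv]
    rw [hstep, hmod]
    apply ih
    intro k v hkv
    rw [PySem.Dict.get?_insert] at hkv
    split_ifs at hkv with he
    · injection hkv with hkv'; subst hkv'; simp
    · exact hinv _ _ hkv

theorem pvEmpty_inv : ∀ (k : Char) (v : List Int),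
    (PySem.Dict.empty : PySem.Dict Char (List Int)).get? k = some v → v ≠ [] := by
  intro k v h
  rw [PySem.Dict.get?_empty] at h
  cases h

theorem pvDict_getD (cs : List Char) (c : Char) :
    (((PySem.List.enumerate cs 0).foldl
      (fun d p =>
        if ((d.get? p.2).getD []) ≠ ([] : List Int) then
          d.insert p.2 ((d.get? p.2).getD [] ++ [p.1])
        else
          d.setdefault p.2 [p.1])
      PySem.Dict.empty).getD c []) = pvIdxs c cs := by
  rw [pvFold_eq _ _ pvEmpty_inv]
  have hfold : (PySem.List.enumerate cs 0).foldl
      (fun d p => d.modify p.2 [] (fun v => v ++ [p.1])) PySem.Dict.empty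
      = ((PySem.List.enumerate cs 0).map (fun p => (p.2, p.1))).foldl
        (fun d q => d.modify q.1 [] (fun v => v ++ [q.2])) PySem.Dict.empty := by
    simp only [List.foldl_map]
  rw [hfold, PySem.Dict.getD_foldl_modify_append]
  simp only [PySem.Dict.getD_empty, List.nil_append]
  unfold pvIdxs
  simp only [List.filter_map, List.map_map]
  rfl

theorem pvDict_keys (cs : List Char) :
    ((PySem.List.enumerate cs 0).foldl
      (fun d p =>
        if ((d.get? p.2).getD []) ≠ ([] : List Int) then
          d.insert p.2 ((d.get? p.2).getD [] ++ [p.1])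
        else
          d.setdefault p.2 [p.1])
      PySem.Dict.empty).keys = PySem.Set.ofList cs := by
  rw [pvFold_eq _ _ pvEmpty_inv]
  have hk := PySem.Dict.keys_foldl_modify_key (PySem.List.enumerate cs 0)
    (fun p : Int × Char => p.2) ([] : List Int) (fun _ p => fun v => v ++ [p.1]) PySem.Dict.empty
  exact hk.trans (by simp only [PySem.List.map_snd_enumerate, PySem.Dict.keys_empty, PySem.Set.ofList_eq_foldl, PySem.Set.update])

theorem pvAlphas (cs : List Char) :
    (((PySem.List.enumerate cs 0).foldl
      (fun d p =>
        if ((d.get? p.2).getD []) ≠ ([] : List Int) then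
          d.insert p.2 ((d.get? p.2).getD [] ++ [p.1])
        else
          d.setdefault p.2 [p.1])
      PySem.Dict.empty).items.foldl
      (fun acc p =>
        if 2 ≤ p.2.length then
          if pvChk (p.2.headD 0) 0 p.2 then acc ++ [p.1] else acc
        else acc) ([] : List Char))
    = (PySem.Set.ofList cs).filter (fun k => pvPA (pvIdxs k cs)) := by
  have hkeys := pvDict_keys cs
  have hgetD := pvDict_getD cs
  rw [pvFold_eq _ _ pvEmpty_inv] at hkeys hgetD ⊢
  set D := (PySem.List.enumerate cs 0).foldl
    (fun d p => d.modify p.2 [] (fun v => v ++ [p.1])) PySem.Dict.empty with hD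
  have hnd : D.keys.Nodup := PySem.Dict.nodup_keys_foldl_modify_key _
    (fun p : Int × Char => p.2) ([] : List Int) (fun _ p => fun v => v ++ [p.1]) _
    PySem.Dict.nodup_keys_empty
  rw [PySem.Dict.items_eq_map_keys D hnd [], List.foldl_map, hkeys]
  have hcong : (PySem.Set.ofList cs).foldl
      (fun acc k => if 2 ≤ (D.getD k []).length then
        (if pvChk ((D.getD k []).headD 0) 0 (D.getD k []) then acc ++ [k] else acc)
        else acc) []
      = (PySem.Set.ofList cs).foldl
        (fun acc k => if pvPA (pvIdxs k cs) = true then acc ++ [k] else acc) [] := by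
    apply PySem.List.foldl_congr_mem
    intro acc k _
    rw [hgetD k]
    unfold pvPA
    by_cases hb1 : 2 ≤ (pvIdxs k cs).length
    · by_cases hb2 : pvChk ((pvIdxs k cs).headD 0) 0 (pvIdxs k cs) = true
      · simp [hb1, hb2]
      · simp [hb1, hb2]
    · simp [hb1]
  exact hcong.trans (by rw [PySem.List.foldl_append_if_eq_filter, List.nil_append])

theorem pvLists_eq (cs : List Char) :
    PySem.List.sorted ((PySem.Set.ofList cs).filter (fun k => pvPA (pvIdxs k cs))) (fun x => x) false
    = PySem.List.sorted
        (PySem.Set.ofList ((pvColl cs).filter (fun ch => 2 ≤ PySem.List.count (pvColl cs) ch)))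
        (fun x => x) false := by
  apply (PySem.List.sorted_id_eq_sorted_id_iff_perm _ _).mpr
  apply (List.perm_ext_iff_of_nodup ((PySem.Set.nodup_ofList cs).filter _)
    (PySem.Set.nodup_ofList _)).mpr
  intro x
  obtain ⟨h0, h1, h2, h3⟩ := pvMain cs x
  simp only [List.mem_filter, PySem.Set.mem_ofList, pvCount_eq, decide_eq_true_eq]
  constructor
  · rintro ⟨hx, hpa⟩
    have hcnt : 2 ≤ (pvColl cs).count x := h2.2 hpa
    exact ⟨List.count_pos_iff.mp (by omega), hcnt⟩
  · rintro ⟨hx, hcnt⟩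
    exact ⟨pvColl_sub hx, h2.1 hcnt⟩

-- ===== VERDICT (by name: the statement is the Claim_ definition above) =====
theorem solution_spec : Claim_equal_solution := by
  intro s _
  unfold Spec_solution solution solution_alt
  simp only [pvAlphas]
  have h := pvLists_eq s.toList
  unfold pvColl at h
  rw [h]
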